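-- pv_equiv track=rewrite | github.com/rumhamdnmchickn/solana-copy-sniper-trading-bot | troubleshoot.py | rust_iter_tokens
-- ===== SOURCE A (Python) =====
-- def rust_iter_tokens(line):
--     """Yield only real brace tokens, skipping strings and comments."""
--     i, n = 0, len(line)
--     in_sl_comment = False
--     in_ml_comment = False
--     in_str = False
--     str_delim = None
--     while i < n:
--         ch = line[i]
--         nxt = line[i+1] if i+1 < n else ''
--         if in_sl_comment:
--             break
--         if in_ml_comment:
--             if ch == '*' and nxt == '/':
--                 in_ml_comment = False; i += 2; continue
--             i += 1; continue
--         if in_str: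
--             if ch == '\\' and i+1 < n:
--                 i += 2; continue
--             if ch == str_delim:
--                 in_str = False; str_delim = None
--             i += 1; continue
--         # not in comment/string
--         if ch == '/' and nxt == '/':
--             in_sl_comment = True; i += 2; continue
--         if ch == '/' and nxt == '*':
--             in_ml_comment = True; i += 2; continue
--         if ch in ('"', "'"):
--             in_str = True; str_delim = ch; i += 1; continue
--         if ch in '{}()[]':
--             yield ch
--         i += 1
-- ===== SOURCE B (Python) =====
-- def _skip_string(s, delim):
--     # consume the body of a string literal; return the suffix after the closing delimiter
--     while s:
--         if s[0] == '\\' and len(s) >= 2: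
--             s = s[2:]
--         elif s[0] == delim:
--             return s[1:]
--         else:
--             s = s[1:]
--     return ''
--
--
-- def _skip_block(s):
--     # consume a block comment; return the suffix after '*/'
--     while s:
--         if s.startswith('*/'):
--             return s[2:]
--         s = s[1:]
--     return ''
--
--
-- def rust_iter_tokens(line):
--     """Yield only real brace tokens, skipping strings and comments."""
--     s = line
--     while s:
--         if s.startswith('//'):
--             return
--         if s.startswith('/*'):
--             s = _skip_block(s[2:])
--         elif s[0] in ('"', "'"):
--             s = _skip_string(s[1:], s[0])
--         elif s[0] in '{}()[]':
--             yield s[0]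
--             s = s[1:]
--         else:
--             s = s[1:]
-- ===== Notes on version B (the rewrite author's own statement) =====
-- stated objective: alternative
-- what changed: Replaced the single index loop with three mutable mode flags by a suffix-based scanner that delegates strings and block comments to dedicated helper functions, so the main loop carries no state flags at all.
import Mathlib
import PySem

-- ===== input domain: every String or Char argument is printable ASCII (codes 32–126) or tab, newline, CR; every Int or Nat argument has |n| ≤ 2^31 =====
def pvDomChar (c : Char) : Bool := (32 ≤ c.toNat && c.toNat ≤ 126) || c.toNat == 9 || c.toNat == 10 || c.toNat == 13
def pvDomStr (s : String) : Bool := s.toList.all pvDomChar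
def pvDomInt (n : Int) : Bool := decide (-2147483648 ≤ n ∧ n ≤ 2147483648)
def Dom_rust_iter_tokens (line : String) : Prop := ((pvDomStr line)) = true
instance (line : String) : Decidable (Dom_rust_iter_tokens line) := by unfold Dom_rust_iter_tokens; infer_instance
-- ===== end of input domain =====

-- B replaces A's flag-driven index loop by a stateless suffix scanner with helper functions for strings and block comments (alternative decomposition, same cost).

-- ===== PORT A =====
-- A's while loop over index i with flags (in_sl_comment, in_ml_comment, in_str, str_delim);
-- ported as the obvious structural recursion over the remaining suffix (i ↦ drop i),
-- keeping all four state components and the exact branch order.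
def goA : List Char → Bool → Bool → Bool → Option Char → List String
  | [], _, _, _, _ => []
  | ch :: rest, sl, ml, instr, delim =>
    let nxt : Option Char := rest.head?    -- line[i+1] if i+1 < n else ''
    if sl then []                          -- 'break'
    else if ml then
      if ch == '*' && nxt == some '/' then goA rest.tail sl false instr delim  -- i += 2
      else goA rest sl ml instr delim                                          -- i += 1
    else if instr then
      if ch == '\\' && rest ≠ [] then goA rest.tail sl ml instr delim          -- i += 2
      else if some ch == delim then goA rest sl ml false none                  -- close string, i += 1
      else goA rest sl ml instr delim                                          -- i += 1
    else if ch == '/' && nxt == some '/' then goA rest.tail true ml instr delim -- sl := true; next iteration breaks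
    else if ch == '/' && nxt == some '*' then goA rest.tail sl true instr delim -- ml := true, i += 2
    else if ch == '"' || ch == '\'' then goA rest sl ml true (some ch)          -- open string, i += 1
    else if ch == '{' || ch == '}' || ch == '(' || ch == ')' || ch == '[' || ch == ']' then
      String.ofList [ch] :: goA rest sl ml instr delim                              -- yield ch
    else goA rest sl ml instr delim
termination_by l _ _ _ _ => l.length
decreasing_by all_goals simp [List.length_tail]

def rust_iter_tokens (line : String) : List String :=
  goA line.toList false false false none

-- ===== PORT B =====
-- helper lemmas the ports need for termination
theorem skipStrB_aux : ∀ (l : List Char), l.tail.length ≤ l.length := by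
  intro l; cases l <;> simp

-- B's _skip_string: consume a string-literal body, return the suffix after the closing delimiter
def skipStrB (d : Char) : List Char → List Char
  | [] => []
  | c :: rest =>
    if c == '\\' && rest ≠ [] then skipStrB d rest.tail
    else if c == d then rest
    else skipStrB d rest
termination_by l => l.length
decreasing_by all_goals simp [List.length_tail]

-- B's _skip_block: consume a block comment, return the suffix after '*/'
def skipBlockB : List Char → List Char
  | [] => []
  | c :: rest =>
    if c == '*' && rest.head? == some '/' then rest.tail
    else skipBlockB rest

theorem skipStrB_length_le (d : Char) : ∀ (l : List Char), (skipStrB d l).length ≤ l.length := by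
  intro l
  induction l using skipStrB.induct d with
  | case1 => simp [skipStrB]
  | case2 c rest h ih =>
      rw [skipStrB, if_pos h]
      calc (skipStrB d rest.tail).length ≤ rest.tail.length := ih
        _ ≤ rest.length := skipStrB_aux rest
        _ ≤ (c :: rest).length := by simp
  | case3 c rest h1 h2 => rw [skipStrB, if_neg h1, if_pos h2]; simp
  | case4 c rest h1 h2 ih =>
      rw [skipStrB, if_neg h1, if_neg h2]
      exact le_trans ih (by simp)

theorem skipBlockB_length_le : ∀ (l : List Char), (skipBlockB l).length ≤ l.length := by
  intro l
  induction l with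
  | nil => simp [skipBlockB]
  | cons c rest ih =>
      rw [skipBlockB]
      split
      · calc rest.tail.length ≤ rest.length := skipStrB_aux rest
          _ ≤ (c :: rest).length := by simp
      · exact le_trans ih (by simp)

-- B's main loop: a stateless scan over the remaining suffix, delegating to the helpers
def scanB : List Char → List String
  | [] => []
  | c :: rest =>
    if c == '/' && rest.head? == some '/' then []                       -- line comment: stop
    else if c == '/' && rest.head? == some '*' then scanB (skipBlockB rest.tail)
    else if c == '"' || c == '\'' then scanB (skipStrB c rest)
    else if c == '{' || c == '}' || c == '(' || c == ')' || c == '[' || c == ']' then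
      String.ofList [c] :: scanB rest
    else scanB rest
termination_by l => l.length
decreasing_by
  · calc (skipBlockB rest.tail).length ≤ rest.tail.length := skipBlockB_length_le _
      _ ≤ rest.length := skipStrB_aux rest
      _ < (c :: rest).length := by simp
  · calc (skipStrB c rest).length ≤ rest.length := skipStrB_length_le _ _
      _ < (c :: rest).length := by simp
  · simp
  · simp

def rust_iter_tokens_alt (line : String) : List String :=
  scanB line.toList

-- ===== PRECONDITION & SPEC =====
def Spec_rust_iter_tokens (line : String) (out : List String) : Prop := out = rust_iter_tokens_alt line
instance (line : String) (out : List String) : Decidable (Spec_rust_iter_tokens line out) := by unfold Spec_rust_iter_tokens; infer_instance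

-- ===== CLAIM (what is proved, stated in full; the proofs are below) =====
def Claim_equal_rust_iter_tokens : Prop := ∀ (line : String), Dom_rust_iter_tokens line → Spec_rust_iter_tokens line (rust_iter_tokens line)

-- ===== LEMMAS AND PROOFS =====
theorem goA_sl (l : List Char) (ml instr : Bool) (d : Option Char) :
    goA l true ml instr d = [] := by
  cases l <;> simp [goA]

theorem goA_eq_scanB : ∀ (n : ℕ) (l : List Char), l.length ≤ n →
    (goA l false false false none = scanB l) ∧
    (∀ d : Char, goA l false false true (some d) = scanB (skipStrB d l)) ∧
    (goA l false true false none = scanB (skipBlockB l)) := by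
  intro n
  induction n with
  | zero =>
      intro l h
      have hl : l = [] := List.eq_nil_of_length_eq_zero (Nat.le_zero.mp h)
      subst hl
      refine ⟨?_, fun d => ?_, ?_⟩ <;> simp [goA, scanB, skipStrB, skipBlockB]
  | succ n ih =>
      intro l h
      cases l with
      | nil => refine ⟨?_, fun d => ?_, ?_⟩ <;> simp [goA, scanB, skipStrB, skipBlockB]
      | cons c rest =>
        have hr : rest.length ≤ n := by simpa using h
        have hrt : rest.tail.length ≤ n := le_trans (skipStrB_aux rest) hr
        refine ⟨?_, fun d => ?_, ?_⟩
        · rw [goA, scanB]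
          simp only [Bool.false_eq_true, if_false]
          split_ifs with h1 h2 h3 h4
          · exact goA_sl _ _ _ _
          · exact (ih rest.tail hrt).2.2
          · rcases Bool.or_eq_true_iff.mp h3 with hq | hq <;>
              simpa [beq_iff_eq.mp hq] using (ih rest hr).2.1 c
          · simp [(ih rest hr).1]
          · exact (ih rest hr).1
        · rw [goA, skipStrB]
          simp only [Bool.false_eq_true, if_false, reduceIte, Option.some_beq_some]
          split_ifs with h1 h2
          · exact (ih rest.tail hrt).2.1 d
          · exact (ih rest hr).1
          · exact (ih rest hr).2.1 d
        · rw [goA, skipBlockB]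
          simp only [Bool.false_eq_true, if_false, reduceIte]
          split_ifs with h1
          · exact (ih rest.tail hrt).1
          · exact (ih rest hr).2.2

theorem rust_iter_tokens_spec : Claim_equal_rust_iter_tokens := by
  intro line _
  unfold Spec_rust_iter_tokens rust_iter_tokens rust_iter_tokens_alt
  exact (goA_eq_scanB line.toList.length line.toList le_rfl).1
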